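-- pv_equiv track=rewrite | github.com/MohamedGhadie/dispensable_ppi_content | code/structural_annotation.py | locate_alignment
-- ===== SOURCE A (Python) =====
-- def locate_alignment (Qseq, Sseq, Qstart, resMatch = False):
--     """Transform single sequence alignment to positions on query sequence.
--
--     Args:
--         Qseq (str): query sequence.
--         Sseq (str): subject sequence.
--         Qstart (int): alignment start position on query sequence.
--         resMatch (bool): if True, residues must match for positions to be considered aligned.
--
--     Returns:
--         list
--
--     """
--     if resMatch:
--         matchPos = [i for i, ch in enumerate(Qseq) if (ch != '-') and (Sseq[i] == ch)]
--     else: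
--         matchPos = [i for i, ch in enumerate(Qseq) if (ch != '-') and (Sseq[i] != '-')]
--     gapPos = [i for i, ch in enumerate(Qseq) if ch == '-']
--     if len(gapPos) == 0:
--         return [pos + Qstart for pos in matchPos]
--     else:
--         numGaps = [len([g for g in gapPos if g < pos]) for pos in matchPos]
--         return [pos + Qstart - gaps for pos, gaps in zip(matchPos, numGaps)]
-- ===== SOURCE B (Python) =====
-- def locate_alignment (Qseq, Sseq, Qstart, resMatch = False):
--     """Single pass over the alignment with a running gap counter."""
--     positions = []
--     gaps = 0
--     for i, ch in enumerate(Qseq):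
--         if ch == '-':
--             gaps += 1
--         elif (Sseq[i] == ch) if resMatch else (Sseq[i] != '-'):
--             positions.append(i + Qstart - gaps)
--     return positions
-- ===== Notes on version B (the rewrite author's own statement) =====
-- stated objective: alternative
-- what changed: B replaces A's three separate comprehensions and per-match recount of preceding gaps with a single pass over the alignment that keeps a running gap counter and emits each mapped position immediately.
import Mathlib
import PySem

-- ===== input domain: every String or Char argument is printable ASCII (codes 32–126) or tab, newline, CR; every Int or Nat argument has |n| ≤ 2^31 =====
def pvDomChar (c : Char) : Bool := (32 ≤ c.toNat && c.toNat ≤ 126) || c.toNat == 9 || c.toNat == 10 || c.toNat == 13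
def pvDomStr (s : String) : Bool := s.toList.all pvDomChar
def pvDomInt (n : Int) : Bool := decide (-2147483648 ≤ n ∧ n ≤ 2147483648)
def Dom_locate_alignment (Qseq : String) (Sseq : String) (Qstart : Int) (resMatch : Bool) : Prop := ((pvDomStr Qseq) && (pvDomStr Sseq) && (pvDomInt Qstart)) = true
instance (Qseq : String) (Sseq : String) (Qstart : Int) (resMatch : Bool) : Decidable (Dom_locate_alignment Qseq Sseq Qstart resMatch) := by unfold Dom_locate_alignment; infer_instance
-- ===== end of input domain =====

-- B replaces A's separate comprehensions and per-match recount of preceding gaps with one pass keeping a running gap counter (objective: alternative).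

-- ===== PORT A =====
def locate_alignment (Qseq : String) (Sseq : String) (Qstart : Int) (resMatch : Bool) : List Int :=
  let matchPos : List Int :=
    if resMatch then
      ((PySem.List.enumerate Qseq.toList).filter
        (fun p => (p.2 != '-') && (PySem.Str.pyGet? Sseq p.1 == some p.2))).map (·.1)
    else
      ((PySem.List.enumerate Qseq.toList).filter
        (fun p => (p.2 != '-') && (PySem.Str.pyGet? Sseq p.1 != some '-'))).map (·.1)
  let gapPos : List Int :=
    ((PySem.List.enumerate Qseq.toList).filter (fun p => p.2 == '-')).map (·.1)
  if gapPos.length = 0 then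
    matchPos.map (fun pos => pos + Qstart)
  else
    let numGaps : List Int := matchPos.map (fun pos => ((gapPos.filter (fun g => g < pos)).length : Int))
    (matchPos.zip numGaps).map (fun pg => pg.1 + Qstart - pg.2)

-- ===== PORT B =====
def locate_alignment_alt (Qseq : String) (Sseq : String) (Qstart : Int) (resMatch : Bool) : List Int :=
  ((PySem.List.enumerate Qseq.toList).foldl
    (fun (st : List Int × Int) p =>
      if p.2 == '-' then (st.1, st.2 + 1)
      else if (if resMatch then PySem.Str.pyGet? Sseq p.1 == some p.2
               else PySem.Str.pyGet? Sseq p.1 != some '-') then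
        (st.1 ++ [p.1 + Qstart - st.2], st.2)
      else st)
    ([], 0)).1

-- ===== PRECONDITION & SPEC =====
-- Pre_ excludes inputs where a non-gap query position has no subject character, on which Python A
-- (and B) raise IndexError at Sseq[i].
def Pre_locate_alignment (Qseq : String) (Sseq : String) (Qstart : Int) (resMatch : Bool) : Prop :=
  ∀ p ∈ PySem.List.enumerate Qseq.toList, p.2 ≠ '-' → p.1 < (Sseq.toList.length : Int)
instance (Qseq : String) (Sseq : String) (Qstart : Int) (resMatch : Bool) : Decidable (Pre_locate_alignment Qseq Sseq Qstart resMatch) := by unfold Pre_locate_alignment; infer_instance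

def pvWitness_locate_alignment : String × String × Int × Bool := ("AB-C", "A-BC", 3, false)

def Spec_locate_alignment (Qseq : String) (Sseq : String) (Qstart : Int) (resMatch : Bool) (out : List Int) : Prop := out = locate_alignment_alt Qseq Sseq Qstart resMatch
instance (Qseq : String) (Sseq : String) (Qstart : Int) (resMatch : Bool) (out : List Int) : Decidable (Spec_locate_alignment Qseq Sseq Qstart resMatch out) := by unfold Spec_locate_alignment; infer_instance

-- ===== CLAIM (what is proved, stated in full; the proofs are below) =====
def Claim_equal_locate_alignment : Prop := ∀ (Qseq : String) (Sseq : String) (Qstart : Int) (resMatch : Bool), Dom_locate_alignment Qseq Sseq Qstart resMatch → Pre_locate_alignment Qseq Sseq Qstart resMatch → Spec_locate_alignment Qseq Sseq Qstart resMatch (locate_alignment Qseq Sseq Qstart resMatch)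

-- ===== LEMMAS AND PROOFS =====

-- The fold of B, over any index-sorted pair list, produces the per-match "position − gaps before it" list.
theorem pv_fold_eq (Qstart : Int) (c : Int × Char → Bool) :
    ∀ (l : List (Int × Char)), l.Pairwise (fun p q => p.1 < q.1) →
    ∀ (acc : List Int) (g0 : Int),
    (l.foldl (fun (st : List Int × Int) p =>
        if p.2 == '-' then (st.1, st.2 + 1)
        else if c p then (st.1 ++ [p.1 + Qstart - st.2], st.2)
        else st) (acc, g0)).1
    = acc ++ (l.filter (fun p => (p.2 != '-') && c p)).map
        (fun p => p.1 + Qstart - g0 - ((l.filter (fun q => q.2 == '-')).filter (fun q => q.1 < p.1)).length) := by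
  intro l hl
  induction l with
  | nil => intro acc g0; simp
  | cons h t ih =>
    intro acc g0
    have hlt : ∀ q ∈ t, h.1 < q.1 := (List.pairwise_cons.mp hl).1
    have ht := (List.pairwise_cons.mp hl).2
    by_cases hg : h.2 = '-'
    · have hgapc : List.filter (fun q : Int × Char => q.2 == '-') (h :: t)
          = h :: List.filter (fun q => q.2 == '-') t := List.filter_cons_of_pos (by simp [hg])
      have hkeepc : List.filter (fun p : Int × Char => (p.2 != '-') && c p) (h :: t)
          = List.filter (fun p => (p.2 != '-') && c p) t := List.filter_cons_of_neg (by simp [hg])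
      rw [List.foldl_cons, if_pos (by simp [hg]), ih ht acc (g0 + 1), hkeepc, hgapc]
      congr 1
      apply List.map_congr_left
      intro p hp
      have hplt : h.1 < p.1 := hlt p (List.mem_of_mem_filter hp)
      rw [List.filter_cons_of_pos (by simp [hplt]), List.length_cons]
      push_cast
      ring
    · have hgap : (h :: t).filter (fun q => q.2 == '-') = t.filter (fun q => q.2 == '-') :=
        List.filter_cons_of_neg (by simp [hg])
      by_cases hc : c h = true
      · rw [List.foldl_cons, if_neg (by simp [hg]), if_pos hc,
          ih ht (acc ++ [h.1 + Qstart - g0]) g0, hgap,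
          show List.filter (fun p : Int × Char => (p.2 != '-') && c p) (h :: t)
              = h :: List.filter (fun p => (p.2 != '-') && c p) t from List.filter_cons_of_pos (by simp [hg, hc]),
          List.map_cons, List.append_assoc,
          List.singleton_append]
        congr 2
        have hnil : (t.filter (fun q => q.2 == '-')).filter (fun q => q.1 < h.1) = [] := by
          rw [List.filter_eq_nil_iff]
          intro q hq
          have : h.1 < q.1 := hlt q (List.mem_of_mem_filter hq)
          simp; omega
        rw [hnil]
        simp
      · rw [List.foldl_cons, if_neg (by simp [hg]), if_neg hc, ih ht acc g0, hgap,
          show List.filter (fun p : Int × Char => (p.2 != '-') && c p) (h :: t)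
              = List.filter (fun p => (p.2 != '-') && c p) t from List.filter_cons_of_neg (by simp [hc])]

-- zip a list with a map of itself and combine: one map.
theorem pv_zip_map (Qstart : Int) (g : Int → Int) :
    ∀ (l : List Int), ((l.zip (l.map g)).map (fun pg => pg.1 + Qstart - pg.2))
      = l.map (fun x => x + Qstart - g x) := by
  intro l
  induction l with
  | nil => rfl
  | cons x t ih => simp [ih]

-- A's result in the common closed form, for either branch of the gap test.
theorem pv_A_closed (Qseq Sseq : String) (Qstart : Int) (resMatch : Bool) (c : Int × Char → Bool)
    (hc : c = fun p => if resMatch then PySem.Str.pyGet? Sseq p.1 == some p.2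
               else PySem.Str.pyGet? Sseq p.1 != some '-') :
    locate_alignment Qseq Sseq Qstart resMatch
    = ((PySem.List.enumerate Qseq.toList).filter (fun p => (p.2 != '-') && c p)).map
        (fun p => p.1 + Qstart - 0 - (((PySem.List.enumerate Qseq.toList).filter (fun q => q.2 == '-')).filter (fun q => q.1 < p.1)).length) := by
  unfold locate_alignment
  set l := PySem.List.enumerate Qseq.toList with hl
  set gp := l.filter (fun q => q.2 == '-') with hgp
  have hfil : ∀ pos : Int, (((gp.map (·.1)).filter (fun g => g < pos)).length : Int)
      = ((gp.filter (fun q => q.1 < pos)).length : Int) := by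
    intro pos
    rw [List.filter_map, List.length_map]
    rfl
  have hmatch : (if resMatch then
      (l.filter (fun p => (p.2 != '-') && (PySem.Str.pyGet? Sseq p.1 == some p.2))).map (·.1)
    else
      (l.filter (fun p => (p.2 != '-') && (PySem.Str.pyGet? Sseq p.1 != some '-'))).map (·.1))
      = (l.filter (fun p => (p.2 != '-') && c p)).map (·.1) := by
    cases resMatch <;> simp [hc]
  simp only [hmatch]
  by_cases hz : (gp.map (·.1)).length = 0
  · rw [if_pos hz]
    have hnil : gp = [] := by
      rw [List.length_map] at hz; exact List.length_eq_zero_iff.mp hz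
    rw [List.map_map]
    apply List.map_congr_left
    intro p hp
    simp [hnil]
  · rw [if_neg hz]
    rw [pv_zip_map Qstart (fun pos => (((gp.map (·.1)).filter (fun g => g < pos)).length : Int))]
    rw [List.map_map]
    apply List.map_congr_left
    intro p hp
    simp only [Function.comp]
    rw [hfil]
    ring

-- ===== VERDICT (by name: the statement is the Claim_ definition above) =====
theorem locate_alignment_spec : Claim_equal_locate_alignment := by
  intro Qseq Sseq Qstart resMatch _ _
  unfold Spec_locate_alignment
  rw [pv_A_closed Qseq Sseq Qstart resMatch _ rfl]
  unfold locate_alignment_alt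
  rw [pv_fold_eq Qstart
      (fun p => if resMatch then PySem.Str.pyGet? Sseq p.1 == some p.2
               else PySem.Str.pyGet? Sseq p.1 != some '-')
      (PySem.List.enumerate Qseq.toList)
      (PySem.List.pairwise_lt_enumerate (xs := Qseq.toList) (s := 0)) [] 0]
  simp
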